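-- pv_equiv track=rewrite | github.com/alexbaryzhikov/codebase-archive | Python/reusable/partitions.py | batches_gen
-- ===== SOURCE A (Python) =====
-- def bit_combinations(n, k):
--     '''Yields bit-coded k-combinations of n elements'''
--     assert 0 <= k <= n   # range of combination size
--     if k == 0:
--         yield 0
--     elif k == 1:
--         for i in range(n):
--             yield 1<<i
--     else:
--         for i in range(n-k+1):
--             for j in bit_combinations(n-i-1, k-1):
--                 yield (1<<i)+(j<<i+1)
--
-- def batches_gen(items, k, n):
--     '''items - list of items, k - size of partition, n - batch size.
--     Yields batches of k-length partitions, n partitions in each batch,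
--     and list of elements excluded from current batch'''
--     assert (0 <= n) & (0 <= k)
--     assert k*n <= len(items)
--     if n == 0:
--         yield [], items
--     else:
--         for c in bit_combinations(len(items), k):
--             reserve = []        # won't go to recursion to avoid duplicates
--             for item in items:
--                 if c&1: break
--                 reserve.append(item)
--                 c >>= 1
--             parts = [[], []]    # [0] goes to recursion, [1] goes to batch
--             for item in items[len(reserve):]:
--                 parts[c&1].append(item)
--                 c >>= 1
--             if len(parts[0]) < k*(n-1):
--                 break # stop if there's not enough items for the partial batch
--             for p, rest in batches_gen(parts[0], k, n-1):
--                 yield [parts[1]]+p, reserve+rest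
-- ===== SOURCE B (Python) =====
-- def combos(seq, k):
--     '''Yields k-combinations of seq as lists, lexicographic by position'''
--     if k == 0:
--         yield []
--     elif seq:
--         head, rest = seq[0], seq[1:]
--         for t in combos(rest, k - 1):
--             yield [head] + t
--         yield from combos(rest, k)
--
-- def batches_gen(items, k, n):
--     '''items - list of items, k - size of partition, n - batch size.
--     Yields batches of k-length partitions, n partitions in each batch,
--     and list of elements excluded from current batch'''
--     assert (0 <= n) & (0 <= k)
--     assert k*n <= len(items)
--     if n == 0:
--         yield [], items
--         return
--     for combo in combos(list(range(len(items))), k):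
--         lo = combo[0] if combo else len(items)
--         reserve = items[:lo]          # before the lowest selected index: withheld to avoid duplicates
--         selected = [items[i] for i in combo]
--         rest = [items[i] for i in range(lo, len(items)) if i not in combo]
--         if len(rest) < k * (n - 1):
--             break  # not enough items left for the remaining partitions
--         for p, r in batches_gen(rest, k, n - 1):
--             yield [selected] + p, reserve + r
-- ===== Notes on version B (the rewrite author's own statement) =====
-- stated objective: simpler
-- what changed: B drops the bit-mask encoding entirely: instead of bit_combinations with per-item shift/parity loops that decode each mask into reserve/parts, it enumerates k-subsets as index lists and builds reserve, selected and rest by slicing and index comprehensions.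
import Mathlib
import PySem

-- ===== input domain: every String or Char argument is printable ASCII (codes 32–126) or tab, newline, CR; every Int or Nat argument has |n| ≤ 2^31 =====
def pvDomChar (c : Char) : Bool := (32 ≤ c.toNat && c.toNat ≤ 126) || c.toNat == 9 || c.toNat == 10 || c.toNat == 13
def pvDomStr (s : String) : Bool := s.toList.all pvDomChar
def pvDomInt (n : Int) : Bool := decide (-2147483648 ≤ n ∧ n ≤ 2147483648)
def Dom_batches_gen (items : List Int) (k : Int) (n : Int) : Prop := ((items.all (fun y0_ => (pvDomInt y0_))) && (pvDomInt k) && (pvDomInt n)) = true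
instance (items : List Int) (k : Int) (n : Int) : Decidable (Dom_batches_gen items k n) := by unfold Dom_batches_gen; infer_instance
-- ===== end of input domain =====

-- B replaces A's bit-mask combination encoding (shift/parity loops) by index-list combinations
-- with slicing and comprehensions; objective: simpler/more idiomatic, same cost.


-- ===== PORT A =====
-- bit_combinations(n, k): bit-coded k-combinations; `range(n-k+1)` ported as `List.range (n+1-k)`,
-- exact for Python's range on a possibly non-positive stop; 1<<i is 1 <<< i, (j << (i+1)) is j <<< (i+1).
def bitCombs (n : Nat) (k : Nat) : List Nat :=
  match k with
  | 0 => [0]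
  | 1 => (List.range n).map (fun i => 1 <<< i)
  | (k' + 2) =>
      (List.range (n + 1 - (k' + 2))).flatMap (fun i =>
        (bitCombs (n - i - 1) (k' + 1)).map (fun j => (1 <<< i) + (j <<< (i + 1))))
  termination_by k

-- the `for item in items: if c&1: break; reserve.append(item); c >>= 1` loop
def reserveOf : Nat → List Int → List Int
  | _, [] => []
  | c, x :: xs => if c % 2 = 1 then [] else x :: reserveOf (c / 2) xs

-- the `for item in items[len(reserve):]: parts[c&1].append(item); c >>= 1` loop
def partsOf : Nat → List Int → List Int × List Int
  | _, [] => ([], [])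
  | c, x :: xs =>
      let p := partsOf (c / 2) xs
      if c % 2 = 1 then (p.1, x :: p.2) else (x :: p.1, p.2)

mutual
-- body of A's generator (n as fuel Nat; Python's asserts are Pre_)
def goA (k : Int) (m : Nat) (items : List Int) : List (List (List Int) × List Int) :=
  match m with
  | 0 => [([], items)]
  | m' + 1 => aLoop k m' items (bitCombs items.length k.toNat)
  termination_by (m, 0)

-- A's `for c in bit_combinations(...)` loop, with its early break
def aLoop (k : Int) (m' : Nat) (items : List Int) : List Nat → List (List (List Int) × List Int)
  | [] => []
  | c :: cs =>
      let reserve := reserveOf c items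
      let c1 := c >>> reserve.length
      let parts := partsOf c1 (items.drop reserve.length)   -- items[len(reserve):]
      if (parts.1.length : Int) < k * (m' : Int) then []    -- break
      else (goA k m' parts.1).map (fun pr => (parts.2 :: pr.1, reserve ++ pr.2)) ++
           aLoop k m' items cs
  termination_by cs => (m', cs.length + 1)
end

def batches_gen (items : List Int) (k : Int) (n : Int) : List (List (List Int) × List Int) :=
  goA k n.toNat items

-- ===== PORT B =====
-- combos(seq, k): k-combinations of seq in lexicographic order (from Source B)
def combosB : List Nat → Nat → List (List Nat)
  | _, 0 => [[]]
  | [], _ + 1 => []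
  | x :: xs, kk + 1 => ((combosB xs kk).map (x :: ·)) ++ combosB xs (kk + 1)

mutual
def goB (k : Int) (m : Nat) (items : List Int) : List (List (List Int) × List Int) :=
  match m with
  | 0 => [([], items)]
  | m' + 1 => bLoop k m' items (combosB (List.range items.length) k.toNat)
  termination_by (m, 0)

-- B's `for combo in combos(...)` loop, with its early break
def bLoop (k : Int) (m' : Nat) (items : List Int) : List (List Nat) → List (List (List Int) × List Int)
  | [] => []
  | combo :: rest =>
      let lo := combo.headD items.length                    -- combo[0] if combo else len(items)
      let reserve := items.take lo                          -- items[:lo]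
      let selected := combo.map (fun i => items.getD i 0)   -- indices are in range by construction
      let restL := ((List.range' lo (items.length - lo)).filter
                      (fun i => ¬ combo.contains i)).map (fun i => items.getD i 0)
      if (restL.length : Int) < k * (m' : Int) then []      -- break
      else (goB k m' restL).map (fun pr => (selected :: pr.1, reserve ++ pr.2)) ++
           bLoop k m' items rest
  termination_by rest => (m', rest.length + 1)
end

def batches_gen_alt (items : List Int) (k : Int) (n : Int) : List (List (List Int) × List Int) :=
  goB k n.toNat items

-- ===== PRECONDITION & SPEC =====
-- exactly the inputs accepted by A's asserts (recursive calls then satisfy them too)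
def Pre_batches_gen (items : List Int) (k : Int) (n : Int) : Prop :=
  0 ≤ n ∧ 0 ≤ k ∧ k * n ≤ (items.length : Int)
instance (items : List Int) (k : Int) (n : Int) : Decidable (Pre_batches_gen items k n) := by
  unfold Pre_batches_gen; infer_instance

def pvWitness_batches_gen : List Int × Int × Int := ([1, 2, 3, 4], 2, 2)

def Spec_batches_gen (items : List Int) (k : Int) (n : Int) (out : List (List (List Int) × List Int)) : Prop := out = batches_gen_alt items k n
instance (items : List Int) (k : Int) (n : Int) (out : List (List (List Int) × List Int)) : Decidable (Spec_batches_gen items k n out) := by unfold Spec_batches_gen; infer_instance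

-- ===== CLAIM (what is proved, stated in full; the proofs are below) =====
def Claim_equal_batches_gen : Prop := ∀ (items : List Int) (k : Int) (n : Int), Dom_batches_gen items k n → Pre_batches_gen items k n → Spec_batches_gen items k n (batches_gen items k n)

-- ===== LEMMAS AND PROOFS =====

-- the bit mask encoded by a list of bit positions
def maskOf (l : List Nat) : Nat := (l.map (fun i => 2 ^ i)).sum

theorem maskOf_nil : maskOf [] = 0 := rfl
theorem maskOf_cons (i : Nat) (t : List Nat) : maskOf (i :: t) = 2 ^ i + maskOf t := by
  simp [maskOf]

theorem maskOf_map_add (s : Nat) (t : List Nat) :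
    maskOf (t.map (fun e => e + s)) = 2 ^ s * maskOf t := by
  induction t with
  | nil => simp [maskOf]
  | cons a t ih => simp [maskOf_cons, ih, pow_add, List.map_cons]; ring

theorem combosB_map (f : Nat → Nat) (xs : List Nat) (k : Nat) :
    combosB (xs.map f) k = (combosB xs k).map (List.map f) := by
  induction xs generalizing k with
  | nil => cases k <;> simp [combosB]
  | cons x xs ih =>
      cases k with
      | zero => simp [combosB]
      | succ kk =>
          simp only [List.map_cons, combosB, ih, List.map_append, List.map_map]
          rfl

theorem combosB_nil_of_short (xs : List Nat) (k : Nat) (h : xs.length < k) :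
    combosB xs k = [] := by
  induction xs generalizing k with
  | nil => cases k with
      | zero => omega
      | succ kk => simp [combosB]
  | cons x xs ih =>
      cases k with
      | zero => omega
      | succ kk =>
          simp only [List.length_cons] at h
          simp only [combosB, ih kk (by omega), ih (kk + 1) (by omega), List.map_nil,
            List.append_nil]

theorem combosB_one (xs : List Nat) : combosB xs 1 = xs.map (fun x => [x]) := by
  induction xs with
  | nil => simp [combosB]
  | cons x xs ih => simp [combosB, ih]

theorem combosB_range'_shift (a n k : Nat) :
    combosB (List.range' a n) k = (combosB (List.range n) k).map (List.map (fun e => e + a)) := by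
  have h : List.range' a n = (List.range n).map (fun e => e + a) := by
    rw [List.range'_eq_map_range]
    exact List.map_congr_left (fun x _ => Nat.add_comm a x)
  rw [h, combosB_map]

theorem combosB_unroll (n a kk : Nat) :
    combosB (List.range' a n) (kk + 1) =
      (List.range n).flatMap (fun i =>
        (combosB (List.range' (a + i + 1) (n - i - 1)) kk).map ((a + i) :: ·)) := by
  induction n generalizing a with
  | zero => simp [combosB]
  | succ n ih =>
      rw [List.range'_succ, List.range_succ_eq_map]
      simp only [combosB, List.flatMap_cons, Nat.add_zero,]
      congr 1
      rw [ih (a + 1), List.flatMap_map]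
      apply List.flatMap_congr
      intro i hi
      have e1 : a + Nat.succ i = a + 1 + i := by omega
      have e2 : n + 1 - Nat.succ i - 1 = n - i - 1 := by omega
      have e3 : a + Nat.succ i + 1 = a + 1 + i + 1 := by omega
      simp only [e1, e2]

theorem range_flatMap_trunc {α : Type} (f : Nat → List α) (m n : Nat) (hmn : m ≤ n)
    (h : ∀ i, m ≤ i → i < n → f i = []) :
    (List.range n).flatMap f = (List.range m).flatMap f := by
  have : n = m + (n - m) := by omega
  rw [this, List.range_add, List.flatMap_append]
  have : ((List.range (n - m)).map (fun i => m + i)).flatMap f = [] := by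
    rw [List.flatMap_map]
    apply List.flatMap_eq_nil_iff.2
    intro i hi
    simp at hi
    exact h (m + i) (by omega) (by omega)
  rw [this, List.append_nil]

-- bit_combinations = masks of the lexicographic index combinations
theorem bitCombs_eq (k n : Nat) :
    bitCombs n k = (combosB (List.range n) k).map maskOf := by
  induction k using Nat.strong_induction_on generalizing n with
  | _ k ih =>
  match k with
  | 0 => simp [bitCombs, combosB, maskOf]
  | 1 =>
      rw [bitCombs, combosB_one, List.map_map]
      apply List.map_congr_left
      intro i _
      simp [maskOf, Nat.shiftLeft_eq]
  | (k' + 2) =>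
      rw [bitCombs]
      have hr : List.range n = List.range' 0 n := List.range_eq_range'
      rw [hr, combosB_unroll n 0 (k' + 1)]
      rw [List.map_flatMap]
      rw [range_flatMap_trunc
            (fun i => ((combosB (List.range' (0 + i + 1) (n - i - 1)) (k' + 1)).map ((0 + i) :: ·)).map maskOf)
            (n + 1 - (k' + 2)) n (by omega) ?empty]
      · apply List.flatMap_congr
        intro i hi
        rw [combosB_range'_shift, ih (k' + 1) (by omega) (n - i - 1)]
        simp only [List.map_map]
        apply List.map_congr_left
        intro t _
        simp [maskOf_cons, maskOf_map_add, Nat.shiftLeft_eq, Function.comp]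
        ring
      · intro i h1 h2
        simp only []
        rw [combosB_nil_of_short _ _ (by simp [List.length_range']; omega)]
        simp

-- all elements of any combosB output come from the seq, in seq order
theorem combosB_sublist (xs : List Nat) (k : Nat) (c : List Nat) (h : c ∈ combosB xs k) :
    c.Sublist xs := by
  induction xs generalizing k c with
  | nil => cases k with
      | zero => simp [combosB] at h; simp [h]
      | succ kk => simp [combosB] at h
  | cons x xs ih =>
      cases k with
      | zero => simp [combosB] at h; simp [h]
      | succ kk =>
          simp [combosB] at h
          rcases h with ⟨t, ht, rfl⟩ | h
          · exact List.Sublist.cons₂ x (ih kk t ht)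
          · exact List.Sublist.cons x (ih (kk + 1) _ h)

-- mask helper: if all positions are ≥ 1 the mask is even and halving shifts positions down
theorem maskOf_pos (l : List Nat) (h : ∀ e ∈ l, 1 ≤ e) :
    maskOf l = 2 * maskOf (l.map (fun e => e - 1)) := by
  induction l with
  | nil => simp [maskOf]
  | cons a t ih =>
      have ha : 1 ≤ a := h a (by simp)
      rw [List.map_cons, maskOf_cons, maskOf_cons, ih (fun e he => h e (by simp [he]))]
      have : 2 ^ a = 2 * 2 ^ (a - 1) := by
        conv_lhs => rw [show a = (a - 1) + 1 by omega]
        ring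
      rw [this]; ring

theorem mem_map_pred (t : List Nat) (h : ∀ e ∈ t, 1 ≤ e) (i : Nat) :
    (i ∈ t.map (fun e => e - 1)) ↔ (i + 1) ∈ t := by
  simp only [List.mem_map]
  constructor
  · rintro ⟨e, he, rfl⟩
    have := h e he
    have : e - 1 + 1 = e := by omega
    rwa [this]
  · intro hi
    exact ⟨i + 1, hi, by omega⟩

theorem pairwise_map_sub (s : Nat) (l : List Nat) (h1 : ∀ e ∈ l, s ≤ e)
    (h : l.Pairwise (· < ·)) : (l.map (fun e => e - s)).Pairwise (· < ·) := by
  rw [List.pairwise_map]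
  refine List.Pairwise.imp_of_mem ?_ h
  intro a b ha hb hab
  have := h1 a ha
  omega

-- T1: the reserve loop takes the items before the lowest selected index
theorem reserve_mask (items : List Int) (combo : List Nat) (h : combo.Pairwise (· < ·)) :
    reserveOf (maskOf combo) items = items.take (combo.headD items.length) := by
  induction items generalizing combo with
  | nil => cases combo <;> simp [reserveOf]
  | cons x xs ih =>
      match combo with
      | [] =>
          simp only [reserveOf, maskOf_nil]
          rw [if_neg (by decide)]
          have := ih [] (by simp)
          simp [maskOf_nil] at this
          simp [this]
      | 0 :: t =>
          have ht : ∀ e ∈ t, 1 ≤ e := by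
            intro e he
            have := (List.pairwise_cons.1 h).1 e he
            omega
          have heven := maskOf_pos t ht
          simp only [reserveOf, maskOf_cons, pow_zero]
          rw [if_pos (by omega)]
          simp
      | (l + 1) :: t =>
          have hall : ∀ e ∈ (l + 1) :: t, 1 ≤ e := by
            intro e he
            rcases List.mem_cons.1 he with rfl | he'
            · omega
            · have := (List.pairwise_cons.1 h).1 e he'
              omega
          have hm := maskOf_pos _ hall
          simp only [reserveOf]
          rw [if_neg (by omega), show maskOf ((l + 1) :: t) / 2 = maskOf (((l + 1) :: t).map (fun e => e - 1)) by omega]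
          rw [ih _ (pairwise_map_sub 1 _ hall h)]
          simp [List.headD]

theorem getD_drop (l : List Int) (lo i : Nat) :
    (l.drop lo).getD i 0 = l.getD (lo + i) 0 := by
  simp [List.getD_eq_getElem?_getD, List.getElem?_drop]

theorem mem_map_sub (s : Nat) (t : List Nat) (h : ∀ e ∈ t, s ≤ e) (i : Nat) :
    (i ∈ t.map (fun e => e - s)) ↔ (i + s) ∈ t := by
  simp only [List.mem_map]
  constructor
  · rintro ⟨e, he, rfl⟩
    have := h e he
    have he2 : e - s + s = e := by omega
    rwa [he2]
  · intro hi
    exact ⟨i + s, hi, by omega⟩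

theorem maskOf_map_sub (s : Nat) (l : List Nat) (h : ∀ e ∈ l, s ≤ e) :
    maskOf l = 2 ^ s * maskOf (l.map (fun e => e - s)) := by
  induction l with
  | nil => simp [maskOf]
  | cons a t ih =>
      have ha : s ≤ a := h a (by simp)
      rw [List.map_cons, maskOf_cons, maskOf_cons, ih (fun e he => h e (by simp [he]))]
      have : 2 ^ a = 2 ^ s * 2 ^ (a - s) := by
        rw [← pow_add]
        congr 1
        omega
      rw [this]; ring

-- pushing the successor map through the not-selected filter
theorem filter_succ_shift (n : Nat) (dorig d' : List Nat)
    (hiff : ∀ i, ((i + 1) ∈ dorig) ↔ i ∈ d') :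
    ((List.range n).map Nat.succ).filter (fun i => ¬ dorig.contains i)
      = ((List.range n).filter (fun i => ¬ d'.contains i)).map Nat.succ := by
  rw [List.filter_map]
  apply congrArg
  apply List.filter_congr
  intro i hi
  simp only [Function.comp_apply, decide_eq_decide, List.contains_iff_mem, Nat.succ_eq_add_one]
  rw [hiff i]

-- T2: the parts loop separates selected positions from the rest
theorem parts_mask (xs : List Int) (d : List Nat) (hp : d.Pairwise (· < ·))
    (hb : ∀ e ∈ d, e < xs.length) :
    partsOf (maskOf d) xs =
      (((List.range xs.length).filter (fun i => ¬ d.contains i)).map (fun i => xs.getD i 0),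
       d.map (fun i => xs.getD i 0)) := by
  induction xs generalizing d with
  | nil =>
      cases d with
      | nil => rfl
      | cons e t => exact absurd (hb e (by simp)) (by simp)
  | cons x xs ih =>
      match d with
      | [] =>
          have hrec := ih [] (by simp) (by simp)
          simp only [maskOf_nil] at hrec
          simp only [partsOf, maskOf_nil]
          rw [if_neg (by decide)]
          simp only [Nat.zero_div, hrec]
          simp [List.range_succ_eq_map, List.filter_map, List.map_map, Function.comp_def]
      | 0 :: t =>
          have ht1 : ∀ e ∈ t, 1 ≤ e := by
            intro e he
            have := (List.pairwise_cons.1 hp).1 e he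
            omega
          have htm := maskOf_pos t ht1
          have hodd : maskOf (0 :: t) % 2 = 1 := by
            rw [maskOf_cons]; simp only [pow_zero]; omega
          have hdiv : maskOf (0 :: t) / 2 = maskOf (t.map (fun e => e - 1)) := by
            rw [maskOf_cons]; simp only [pow_zero]; omega
          have hrec := ih (t.map (fun e => e - 1))
            (pairwise_map_sub 1 t ht1 (List.pairwise_cons.1 hp).2)
            (by
              intro e he
              rcases List.mem_map.1 he with ⟨a, ha, rfl⟩
              have h2 := hb a (by simp [ha])
              have h3 := ht1 a ha
              simp only [List.length_cons] at h2
              omega)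
          simp only [partsOf, hodd, hdiv, hrec]
          rw [if_pos trivial]
          simp only [List.length_cons, List.range_succ_eq_map, List.filter_cons,
            Prod.mk.injEq]
          constructor
          · rw [if_neg (by simp),
              filter_succ_shift _ (0 :: t) (t.map (fun e => e - 1))
                (fun i => by
                  rw [mem_map_pred t ht1 i]
                  simp),
              List.map_map]
            apply List.map_congr_left
            intro i _
            simp [List.getD_cons_succ]
          · rw [List.map_cons, List.getD_cons_zero, List.map_map]
            apply congrArg
            apply List.map_congr_left
            intro e he
            obtain ⟨e', rfl⟩ : ∃ e', e = e' + 1 := ⟨e - 1, by have := ht1 e he; omega⟩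
            simp [List.getD_cons_succ]
      | (l + 1) :: t =>
          have hall : ∀ e ∈ (l + 1) :: t, 1 ≤ e := by
            intro e he
            rcases List.mem_cons.1 he with rfl | he'
            · omega
            · have := (List.pairwise_cons.1 hp).1 e he'
              omega
          have hm := maskOf_pos _ hall
          have heven : maskOf ((l + 1) :: t) % 2 = 0 := by omega
          have hdiv : maskOf ((l + 1) :: t) / 2 = maskOf (((l + 1) :: t).map (fun e => e - 1)) := by
            omega
          have hrec := ih (((l + 1) :: t).map (fun e => e - 1))
            (pairwise_map_sub 1 _ hall hp)
            (by
              intro e he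
              rcases List.mem_map.1 he with ⟨a, ha, rfl⟩
              have h2 := hb a ha
              have h3 := hall a ha
              simp only [List.length_cons] at h2
              omega)
          simp only [partsOf, heven, hdiv, hrec]
          rw [if_neg (by omega)]
          simp only [List.length_cons, List.range_succ_eq_map, List.filter_cons,
            Prod.mk.injEq]
          constructor
          · have h0 : (0 : Nat) ∉ (l + 1) :: t := by
              intro h
              rcases List.mem_cons.1 h with h' | h'
              · omega
              · exact absurd (hall 0 (by simp [h'])) (by omega)
            rw [if_pos (by simp [h0]),
              filter_succ_shift _ ((l + 1) :: t) (((l + 1) :: t).map (fun e => e - 1))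
                (fun i => (mem_map_pred _ hall i).symm)]
            simp only [List.map_cons, List.getD_cons_zero, List.map_map]
            apply congrArg
            apply List.map_congr_left
            intro i _
            simp [List.getD_cons_succ]
          · simp only [List.map_cons, List.map_map, List.getD_cons_succ, Nat.add_sub_cancel]
            apply congrArg
            apply List.map_congr_left
            intro e he
            obtain ⟨e', rfl⟩ : ∃ e', e = e' + 1 := ⟨e - 1, by have := hall e (by simp [he]); omega⟩
            simp [List.getD_cons_succ]

-- A's loop over masks agrees with B's loop over the corresponding index lists
theorem loop_eq (k : Int) (m' : Nat) (items : List Int) (cs : List (List Nat))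
    (hgo : ∀ its, goA k m' its = goB k m' its)
    (hcs : ∀ c ∈ cs, c.Pairwise (· < ·) ∧ ∀ e ∈ c, e < items.length) :
    aLoop k m' items (cs.map maskOf) = bLoop k m' items cs := by
  induction cs with
  | nil => simp [aLoop, bLoop]
  | cons combo cs ih =>
      obtain ⟨hpw, hbd⟩ := hcs combo (by simp)
      have ihcs := ih (fun c hc => hcs c (by simp [hc]))
      rw [List.map_cons]
      match combo with
      | [] =>
          have h1 : reserveOf (maskOf []) items = items := by
            rw [reserve_mask items [] (by simp)]
            simp
          simp only [aLoop, bLoop, h1, List.headD_nil, List.drop_length, partsOf,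
            Nat.sub_self, List.range'_zero, List.filter_nil, List.map_nil,
            List.length_nil, List.take_length]
          rw [hgo, ihcs]
      | lo :: t =>
          have hlt : lo < items.length := hbd lo (by simp)
          have hge : ∀ e ∈ lo :: t, lo ≤ e := by
            intro e he
            rcases List.mem_cons.1 he with rfl | he'
            · omega
            · exact Nat.le_of_lt ((List.pairwise_cons.1 hpw).1 e he')
          have h1 : reserveOf (maskOf (lo :: t)) items = items.take lo := by
            rw [reserve_mask items _ hpw, List.headD_cons]
          have hlen : (items.take lo).length = lo := by
            rw [List.length_take]
            omega
          have hshift : maskOf (lo :: t) >>> lo = maskOf ((lo :: t).map (fun e => e - lo)) := by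
            rw [Nat.shiftRight_eq_div_pow, maskOf_map_sub lo _ hge,
              Nat.mul_div_cancel_left _ (Nat.two_pow_pos lo)]
          have hpm := parts_mask (items.drop lo) ((lo :: t).map (fun e => e - lo))
            (pairwise_map_sub lo _ hge hpw)
            (by
              intro e he
              rcases List.mem_map.1 he with ⟨a, ha, rfl⟩
              have h2 := hbd a ha
              have h3 := hge a ha
              rw [List.length_drop]
              omega)
          have hS : ((lo :: t).map (fun e => e - lo)).map (fun i => (items.drop lo).getD i 0)
              = (lo :: t).map (fun i => items.getD i 0) := by
            rw [List.map_map]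
            apply List.map_congr_left
            intro e he
            have h3 := hge e he
            simp only [Function.comp_apply, getD_drop]
            congr 1
            omega
          have hF : (((List.range (items.length - lo)).filter
                  (fun i => ¬ ((lo :: t).map (fun e => e - lo)).contains i)).map
                    (fun i => (items.drop lo).getD i 0))
              = ((List.range' lo (items.length - lo)).filter
                  (fun i => ¬ (lo :: t).contains i)).map (fun i => items.getD i 0) := by
            rw [List.range'_eq_map_range, List.filter_map, List.map_map]
            have hfil : (List.range (items.length - lo)).filter
                  (fun i => ¬ ((lo :: t).map (fun e => e - lo)).contains i)
                = (List.range (items.length - lo)).filter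
                  ((fun i => ¬ (lo :: t).contains i) ∘ (fun i => lo + i)) := by
              apply List.filter_congr
              intro i _
              simp only [Function.comp_apply, decide_eq_decide, List.contains_iff_mem]
              rw [mem_map_sub lo _ hge i, Nat.add_comm]
            rw [hfil]
            apply List.map_congr_left
            intro i _
            simp only [Function.comp_apply, getD_drop]
          have hp1 : (partsOf (maskOf (lo :: t) >>> (items.take lo).length)
                (items.drop (items.take lo).length)).1
              = ((List.range' lo (items.length - lo)).filter
                  (fun i => ¬ (lo :: t).contains i)).map (fun i => items.getD i 0) := by
            rw [hlen, hshift, hpm, List.length_drop, ← hF]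
          have hp2 : (partsOf (maskOf (lo :: t) >>> (items.take lo).length)
                (items.drop (items.take lo).length)).2
              = (lo :: t).map (fun i => items.getD i 0) := by
            rw [hlen, hshift, hpm, ← hS]
          simp only [aLoop, bLoop, h1, hp1, hp2, List.headD_cons]
          rw [hgo, ihcs]

-- the generator bodies agree for every fuel value
theorem go_eq : ∀ (m : Nat) (k : Int) (items : List Int), goA k m items = goB k m items := by
  intro m
  induction m with
  | zero => intro k items; simp [goA, goB]
  | succ m' ih =>
      intro k items
      rw [goA, goB, bitCombs_eq]
      refine loop_eq k m' items _ (fun its => ih k its) ?_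
      intro c hc
      have hsub := combosB_sublist _ _ c hc
      exact ⟨(List.pairwise_lt_range).sublist hsub,
        fun e he => List.mem_range.1 (hsub.subset he)⟩

-- ===== VERDICT (by name: the statement is the Claim_ definition above) =====
theorem batches_gen_spec : Claim_equal_batches_gen := by
  intro items k n _ _
  show batches_gen items k n = batches_gen_alt items k n
  exact go_eq n.toNat k items
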